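-- pv_equiv track=rewrite | github.com/Dillon-Dumesnil/advent-of-code | 2018/day-16/part-2.py | process_opcodes
-- ===== SOURCE A (Python) =====
-- def process_opcodes(opcodes):
--     # This is to reduce each opcode down to a single possible operation.
--     for i in range(16):
--         for code in opcodes:
--             if len(opcodes[code]) == 1:
--                 for k in opcodes:
--                     if k != code and opcodes[code][0] in opcodes[k]:
--                         opcodes[k].remove(opcodes[code][0])
--     return opcodes
-- ===== SOURCE B (Python) =====
-- def process_opcodes(opcodes):
--     # Inverted index (value -> insertion-ordered set of codes whose candidate
--     # list contains it) replaces the inner scan over all codes, and the fixed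
--     # 16 rounds stop early once a round removes nothing. Mutates and returns
--     # the same dict, like the original.
--     index = {}
--     for code, candidates in opcodes.items():
--         for v in candidates:
--             index.setdefault(v, {})[code] = True
--     for _ in range(16):
--         changed = False
--         for code in opcodes:
--             candidates = opcodes[code]
--             if len(candidates) == 1:
--                 v = candidates[0]
--                 for k in list(index[v]):
--                     if k != code:
--                         others = opcodes[k]
--                         others.remove(v)
--                         changed = True
--                         if v not in others:
--                             del index[v][k]
--         if not changed:
--             break
--     return opcodes
-- ===== Notes on version B (the rewrite author's own statement) =====
-- stated objective: alternative
-- what changed: B builds an inverted index (candidate value -> set of codes whose list contains it) once, so A's innermost scan over all codes with an 'in' membership test disappears (each elimination touches only the lists actually containing the value), and B stops the fixed 16 rounds as soon as a round removes nothing; it trades the index's build/maintenance cost for the removed inner scan.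
import Mathlib
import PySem

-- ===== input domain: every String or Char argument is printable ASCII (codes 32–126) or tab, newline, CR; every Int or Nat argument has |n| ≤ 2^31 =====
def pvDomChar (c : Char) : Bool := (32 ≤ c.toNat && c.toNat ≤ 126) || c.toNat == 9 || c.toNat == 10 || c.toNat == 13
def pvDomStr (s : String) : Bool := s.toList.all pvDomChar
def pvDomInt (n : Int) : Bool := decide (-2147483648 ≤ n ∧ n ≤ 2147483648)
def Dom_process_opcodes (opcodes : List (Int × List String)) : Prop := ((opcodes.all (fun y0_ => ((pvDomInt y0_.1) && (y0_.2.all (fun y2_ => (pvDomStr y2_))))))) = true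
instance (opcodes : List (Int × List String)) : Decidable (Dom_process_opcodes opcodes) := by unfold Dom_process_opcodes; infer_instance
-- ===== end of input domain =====

-- B replaces A's inner scan over all codes by an inverted index value→codes built once, and
-- stops the fixed 16 rounds as soon as a round removes nothing; both mutate the dict's lists
-- in place in Python and return the same dict — the equality proved here is about the
-- returned mapping (dicts are modelled as association lists built by insertion).

abbrev PvDictT := PySem.Dict Int (List String)
abbrev PvIdxT := PySem.Dict String (PySem.Dict Int Bool)
abbrev PvStT := PvDictT × PvIdxT × Bool

-- shared primitive: Python's list.remove(v), used only where v is guaranteed present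
def pvRemove (l : List String) (v : String) : List String := (PySem.List.remove? l v).getD l

-- ===== PORT A =====
-- one step of A's innermost loop: `if k != code and v in opcodes[k]: opcodes[k].remove(v)`
-- (v = opcodes[code][0] is loop-invariant inside the innermost loop, since k ≠ code)
def pvStepA (code : Int) (v : String) (d : PvDictT) (k : Int) : PvDictT :=
  if k ≠ code ∧ v ∈ d.getD k [] then d.insert k (pvRemove (d.getD k []) v) else d

-- body of `for code in opcodes:` — `if len(opcodes[code]) == 1:` then the inner loop over keys
def pvScanA (keys : List Int) (d : PvDictT) (code : Int) : PvDictT :=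
  if (d.getD code []).length = 1 then
    keys.foldl (pvStepA code ((d.getD code []).headD "")) d
  else d

def pvSweepA (keys : List Int) (d : PvDictT) : PvDictT := keys.foldl (pvScanA keys) d

def process_opcodes (opcodes : List (Int × List String)) : List (Int × List String) :=
  ((List.range 16).foldl (fun d _ => pvSweepA (PySem.Dict.ofList opcodes).keys d)
    (PySem.Dict.ofList opcodes)).items

-- ===== PORT B =====
-- index build: `index.setdefault(v, {})[code] = True` for each candidate v of each code
def pvIdxAdd (code : Int) (idx : PvIdxT) (v : String) : PvIdxT :=
  idx.insert v ((idx.getD v PySem.Dict.empty).insert code true)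

def pvBuildIdxB (items : List (Int × List String)) : PvIdxT :=
  items.foldl (fun idx p => p.2.foldl (pvIdxAdd p.1) idx) PySem.Dict.empty

-- body of `for k in list(index[v]):` — remove v from opcodes[k], set changed,
-- and drop k from index[v] when v no longer occurs in opcodes[k]
def pvStepB (code : Int) (v : String) (st : PvStT) (k : Int) : PvStT :=
  if k ≠ code then
    (st.1.insert k (pvRemove (st.1.getD k []) v),
     (if v ∈ pvRemove (st.1.getD k []) v then st.2.1
      else st.2.1.insert v ((st.2.1.getD v PySem.Dict.empty).erase k)),
     true)
  else st

def pvScanB (st : PvStT) (code : Int) : PvStT :=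
  if (st.1.getD code []).length = 1 then
    ((st.2.1.getD ((st.1.getD code []).headD "") PySem.Dict.empty).keys).foldl
      (pvStepB code ((st.1.getD code []).headD "")) st
  else st

def pvSweepB (keys : List Int) (st : PvStT) : PvStT := keys.foldl pvScanB st

-- `for _ in range(16): changed = False; … ; if not changed: break`
def pvLoopB (keys : List Int) : Nat → PvDictT → PvIdxT → PvDictT
  | 0, d, _ => d
  | n + 1, d, idx =>
    if (pvSweepB keys (d, idx, false)).2.2 = true then
      pvLoopB keys n (pvSweepB keys (d, idx, false)).1 (pvSweepB keys (d, idx, false)).2.1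
    else (pvSweepB keys (d, idx, false)).1

def process_opcodes_alt (opcodes : List (Int × List String)) : List (Int × List String) :=
  (pvLoopB (PySem.Dict.ofList opcodes).keys 16 (PySem.Dict.ofList opcodes)
    (pvBuildIdxB (PySem.Dict.ofList opcodes).items)).items

-- ===== PRECONDITION & SPEC =====
def Spec_process_opcodes (opcodes : List (Int × List String)) (out : List (Int × List String)) : Prop := out = process_opcodes_alt opcodes
instance (opcodes : List (Int × List String)) (out : List (Int × List String)) : Decidable (Spec_process_opcodes opcodes out) := by unfold Spec_process_opcodes; infer_instance

-- ===== CLAIM (what is proved, stated in full; the proofs are below) =====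
def Claim_equal_process_opcodes : Prop := ∀ (opcodes : List (Int × List String)), Dom_process_opcodes opcodes → Spec_process_opcodes opcodes (process_opcodes opcodes)

-- ===== LEMMAS AND PROOFS =====

-- the invariant tying B's inverted index to the current dict:
-- index[w] contains k  ↔  k is a key and w occurs in k's candidate list
def pvInv (keys0 : List Int) (d : PvDictT) (idx : PvIdxT) : Prop :=
  d.keys = keys0 ∧ (∀ w : String, ((idx.getD w PySem.Dict.empty).keys.Nodup)) ∧
  ∀ (w : String) (k : Int),
    ((idx.getD w PySem.Dict.empty).contains k = true ↔ (k ∈ keys0 ∧ w ∈ d.getD k []))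

lemma pvRemove_of_mem {l : List String} {v : String} (h : v ∈ l) :
    pvRemove l v = l.erase v := by
  simp [pvRemove, PySem.List.remove?_eq_some_erase l v h]

lemma pvNodup_keys_erase {κ ν : Type} [BEq κ] (d : PySem.Dict κ ν) (k : κ)
    (h : d.keys.Nodup) : (d.erase k).keys.Nodup := by
  have hsub : (d.erase k).keys.Sublist d.keys := by
    simpa [PySem.Dict.erase, PySem.Dict.keys] using
      (List.filter_sublist (l := d.items) (p := fun p => !(p.1 == k))).map (fun p => p.1)
  exact h.sublist hsub

lemma pvContains_erase_iff {κ ν : Type} [BEq κ] [LawfulBEq κ] (d : PySem.Dict κ ν) (k j : κ) :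
    ((d.erase k).contains j = true) ↔ (j ≠ k ∧ d.contains j = true) := by
  simp only [PySem.Dict.erase, PySem.Dict.contains, List.any_eq_true, List.mem_filter]
  constructor
  · rintro ⟨p, ⟨hp, hpk⟩, hpj⟩
    have hj : p.1 = j := by simpa using hpj
    have hk : ¬ (p.1 = k) := by simpa using hpk
    exact ⟨by rintro rfl; exact hk hj, ⟨p, hp, hpj⟩⟩
  · rintro ⟨hjk, p, hp, hpj⟩
    have hj : p.1 = j := by simpa using hpj
    exact ⟨p, ⟨hp, by simpa [hj] using hjk⟩, hpj⟩

-- pointwise characterization of a fold that conditionally updates entry k in place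
lemma pvFold_get? (P : Int → List String → Prop) [inst : ∀ k l, Decidable (P k l)]
    (f : Int → List String → List String) :
    ∀ (ks : List Int) (d : PvDictT), ks.Nodup → ∀ (j : Int),
      (ks.foldl (fun d k => if P k (d.getD k []) then d.insert k (f k (d.getD k [])) else d) d).get? j
        = if j ∈ ks ∧ P j (d.getD j []) then some (f j (d.getD j [])) else d.get? j := by
  intro ks
  induction ks with
  | nil => intro d _ j; simp
  | cons k0 ks ih =>
    intro d hnd j
    rw [List.foldl_cons, ih _ hnd.of_cons j]
    rcases List.nodup_cons.mp hnd with ⟨hk0, _⟩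
    by_cases hj : j = k0
    · subst hj
      have hjks : j ∉ ks := hk0
      by_cases hP : P j (d.getD j [])
      · simp [hjks, hP]
      · simp [hjks, hP]
    · have h1 : (if P k0 (d.getD k0 []) then d.insert k0 (f k0 (d.getD k0 [])) else d).getD j []
          = d.getD j [] := by
        split_ifs with h
        · rw [PySem.Dict.getD_insert, if_neg hj]
        · rfl
      have h2 : (if P k0 (d.getD k0 []) then d.insert k0 (f k0 (d.getD k0 [])) else d).get? j
          = d.get? j := by
        split_ifs with h
        · rw [PySem.Dict.get?_insert, if_neg hj]
        · rfl
      rw [h1, h2]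
      simp [List.mem_cons, hj]

lemma pvFold_keys (P : Int → List String → Prop) [inst : ∀ k l, Decidable (P k l)]
    (f : Int → List String → List String) :
    ∀ (ks : List Int) (d : PvDictT), (∀ k ∈ ks, k ∈ d.keys) →
      (ks.foldl (fun d k => if P k (d.getD k []) then d.insert k (f k (d.getD k [])) else d) d).keys
        = d.keys := by
  intro ks
  induction ks with
  | nil => intro d _; rfl
  | cons k0 ks ih =>
    intro d hmem
    rw [List.foldl_cons]
    have hk0 : d.contains k0 = true :=
      (PySem.Dict.contains_iff_mem_keys d k0).mpr (hmem k0 (List.mem_cons_self))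
    have hkeys : (if P k0 (d.getD k0 []) then d.insert k0 (f k0 (d.getD k0 [])) else d).keys
        = d.keys := by
      split_ifs with h
      · exact PySem.Dict.keys_insert_of_contains d _ hk0
      · rfl
    rw [ih _ (by rw [hkeys]; exact fun k hk => hmem k (List.mem_cons_of_mem _ hk)), hkeys]

-- the dict component of B's inner fold ignores the index and flag
lemma pvFoldB_fst (code : Int) (v : String) :
    ∀ (ks : List Int) (st : PvStT),
      (ks.foldl (pvStepB code v) st).1
        = ks.foldl (fun d k => if k ≠ code then d.insert k (pvRemove (d.getD k []) v) else d) st.1 := by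
  intro ks
  induction ks with
  | nil => intro st; rfl
  | cons k0 ks ih =>
    intro st
    rw [List.foldl_cons, List.foldl_cons, ih]
    by_cases hk : k0 = code
    · simp [pvStepB, hk]
    · simp [pvStepB, hk]

lemma pvActB_id (code : Int) (v : String) :
    ∀ (ks : List Int) (st : PvStT), (∀ k ∈ ks, k = code) →
      ks.foldl (pvStepB code v) st = st := by
  intro ks
  induction ks with
  | nil => intro st _; rfl
  | cons k0 ks ih =>
    intro st h
    rw [List.foldl_cons]
    have hk : k0 = code := h k0 (List.mem_cons_self)
    have : pvStepB code v st k0 = st := by simp [pvStepB, hk]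
    rw [this]
    exact ih st (fun k hk => h k (List.mem_cons_of_mem _ hk))

-- one removal step preserves the invariant
lemma pvInv_update (keys0 : List Int) (d : PvDictT) (idx : PvIdxT) (k0 : Int) (v : String)
    (hinv : pvInv keys0 d idx) (hk0 : k0 ∈ keys0) (hv : v ∈ d.getD k0 []) :
    pvInv keys0 (d.insert k0 ((d.getD k0 []).erase v))
      (if v ∈ (d.getD k0 []).erase v then idx
       else idx.insert v ((idx.getD v PySem.Dict.empty).erase k0)) := by
  obtain ⟨hkeys, hnd, hiff⟩ := hinv
  have hcont : d.contains k0 = true :=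
    (PySem.Dict.contains_iff_mem_keys d k0).mpr (hkeys ▸ hk0)
  refine ⟨by rw [PySem.Dict.keys_insert_of_contains d _ hcont]; exact hkeys, ?_, ?_⟩
  · intro w
    split_ifs with hdup
    · exact hnd w
    · rw [PySem.Dict.getD_insert]
      split_ifs with hw
      · exact pvNodup_keys_erase _ _ (hnd v)
      · exact hnd w
  · intro w k
    have hgd : (d.insert k0 ((d.getD k0 []).erase v)).getD k []
        = if k = k0 then (d.getD k0 []).erase v else d.getD k [] := PySem.Dict.getD_insert ..
    by_cases hdup : v ∈ (d.getD k0 []).erase v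
    · rw [if_pos hdup, hiff w k, hgd]
      by_cases hk : k = k0
      · rw [if_pos hk, hk]
        constructor
        · rintro ⟨h1, h2⟩
          refine ⟨h1, ?_⟩
          by_cases hw : w = v
          · rw [hw]; exact hdup
          · exact (List.mem_erase_of_ne hw).mpr h2
        · rintro ⟨h1, h2⟩
          refine ⟨h1, ?_⟩
          by_cases hw : w = v
          · rw [hw]; exact hv
          · exact (List.mem_erase_of_ne hw).mp h2
      · rw [if_neg hk]
    · rw [if_neg hdup, PySem.Dict.getD_insert]
      by_cases hw : w = v
      · rw [if_pos hw, pvContains_erase_iff, hiff v k, hgd]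
        by_cases hk : k = k0
        · rw [if_pos hk]
          constructor
          · rintro ⟨h1, _⟩; exact absurd hk h1
          · rintro ⟨_, h2⟩; rw [hw] at h2; exact absurd h2 hdup
        · rw [if_neg hk]
          constructor
          · rintro ⟨_, h⟩; rw [hw]; exact h
          · intro h; rw [hw] at h; exact ⟨hk, h⟩
      · rw [if_neg hw, hiff w k, hgd]
        by_cases hk : k = k0
        · rw [if_pos hk, hk]
          constructor
          · rintro ⟨h1, h2⟩; exact ⟨h1, (List.mem_erase_of_ne hw).mpr h2⟩
          · rintro ⟨h1, h2⟩; exact ⟨h1, (List.mem_erase_of_ne hw).mp h2⟩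
        · rw [if_neg hk]

-- B's act: invariant preservation and the exact value of the changed flag
lemma pvActB_spec (keys0 : List Int) (code : Int) (v : String) :
    ∀ (ks : List Int) (d : PvDictT) (idx : PvIdxT) (ch : Bool),
      ks.Nodup → (∀ k ∈ ks, k ∈ keys0 ∧ v ∈ d.getD k []) → pvInv keys0 d idx →
      pvInv keys0 (ks.foldl (pvStepB code v) (d, idx, ch)).1 (ks.foldl (pvStepB code v) (d, idx, ch)).2.1
      ∧ (ks.foldl (pvStepB code v) (d, idx, ch)).2.2 = (ch || ks.any (fun k => k != code)) := by
  intro ks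
  induction ks with
  | nil => intro d idx ch _ _ hinv; exact ⟨hinv, by simp⟩
  | cons k0 ks ih =>
    intro d idx ch hnd hmem hinv
    rcases List.nodup_cons.mp hnd with ⟨hk0ks, hndks⟩
    by_cases hk : k0 = code
    · have hstep : pvStepB code v (d, idx, ch) k0 = (d, idx, ch) := by simp [pvStepB, hk]
      rw [List.foldl_cons, hstep]
      have := ih d idx ch hndks (fun k hk => hmem k (List.mem_cons_of_mem _ hk)) hinv
      refine ⟨this.1, ?_⟩
      rw [this.2]
      simp [hk]
    · obtain ⟨hk0m, hvm⟩ := hmem k0 (List.mem_cons_self)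
      have hrem : pvRemove (d.getD k0 []) v = (d.getD k0 []).erase v := pvRemove_of_mem hvm
      have hstep : pvStepB code v (d, idx, ch) k0
          = (d.insert k0 ((d.getD k0 []).erase v),
             (if v ∈ (d.getD k0 []).erase v then idx
              else idx.insert v ((idx.getD v PySem.Dict.empty).erase k0)),
             true) := by
        simp only [pvStepB, if_pos hk]
        rw [hrem]
      rw [List.foldl_cons, hstep]
      have hinv' := pvInv_update keys0 d idx k0 v hinv hk0m hvm
      have hmem' : ∀ k ∈ ks, k ∈ keys0 ∧ v ∈ (d.insert k0 ((d.getD k0 []).erase v)).getD k [] := by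
        intro k hkm
        obtain ⟨h1, h2⟩ := hmem k (List.mem_cons_of_mem _ hkm)
        refine ⟨h1, ?_⟩
        rw [PySem.Dict.getD_insert, if_neg (by rintro rfl; exact hk0ks hkm)]
        exact h2
      have := ih _ _ true hndks hmem' hinv'
      refine ⟨this.1, ?_⟩
      rw [this.2]
      simp [hk]

-- A's act over all keys equals the dict component of B's act over index[v]
lemma pvAct_eq (keys0 : List Int) (hnd0 : keys0.Nodup) (code : Int) (v : String)
    (d : PvDictT) (idx : PvIdxT) (ch : Bool) (hinv : pvInv keys0 d idx) :
    keys0.foldl (pvStepA code v) d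
      = (((idx.getD v PySem.Dict.empty).keys).foldl (pvStepB code v) (d, idx, ch)).1 := by
  obtain ⟨hkeys, hndI, hiff⟩ := hinv
  have hksmem : ∀ k, k ∈ (idx.getD v PySem.Dict.empty).keys ↔ (k ∈ keys0 ∧ v ∈ d.getD k []) := by
    intro k
    rw [← PySem.Dict.contains_iff_mem_keys, hiff v k]
  have hA : (fun (d : PvDictT) k => if k ≠ code ∧ v ∈ d.getD k [] then d.insert k (pvRemove (d.getD k []) v) else d)
      = pvStepA code v := rfl
  have hAget := pvFold_get? (fun k l => k ≠ code ∧ v ∈ l) (fun _ l => pvRemove l v) keys0 d hnd0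
  rw [hA] at hAget
  have hBget := pvFold_get? (fun k _ => k ≠ code) (fun _ l => pvRemove l v)
      ((idx.getD v PySem.Dict.empty).keys) d (hndI v)
  have hAkeys := pvFold_keys (fun k l => k ≠ code ∧ v ∈ l) (fun _ l => pvRemove l v) keys0 d
      (by rw [hkeys]; exact fun k hk => hk)
  rw [hA] at hAkeys
  have hBkeys := pvFold_keys (fun k _ => k ≠ code) (fun _ l => pvRemove l v)
      ((idx.getD v PySem.Dict.empty).keys) d
      (by intro k hk; rw [hkeys]; exact ((hksmem k).mp hk).1)
  rw [pvFoldB_fst]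
  have hget : ∀ j, (keys0.foldl (pvStepA code v) d).get? j
      = ((((idx.getD v PySem.Dict.empty).keys)).foldl
          (fun d k => if k ≠ code then d.insert k (pvRemove (d.getD k []) v) else d) d).get? j := by
    intro j
    rw [hAget j, hBget j]
    by_cases hc : j ∈ keys0 ∧ (j ≠ code ∧ v ∈ d.getD j [])
    · rw [if_pos hc, if_pos ⟨(hksmem j).mpr ⟨hc.1, hc.2.2⟩, hc.2.1⟩]
    · rw [if_neg hc, if_neg ?_]
      rintro ⟨hj1, hj2⟩
      obtain ⟨hm, hv⟩ := (hksmem j).mp hj1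
      exact hc ⟨hm, hj2, hv⟩
  apply PySem.Dict.ext
  rw [PySem.Dict.items_eq_map_keys _ (by rw [hAkeys, hkeys]; exact hnd0) [],
      PySem.Dict.items_eq_map_keys _ (by rw [hBkeys, hkeys]; exact hnd0) [],
      hAkeys, hBkeys, hkeys]
  apply List.map_congr_left
  intro k _
  have : (keys0.foldl (pvStepA code v) d).getD k []
      = ((((idx.getD v PySem.Dict.empty).keys)).foldl
          (fun d k => if k ≠ code then d.insert k (pvRemove (d.getD k []) v) else d) d).getD k [] := by
    show ((keys0.foldl (pvStepA code v) d).get? k).getD [] = _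
    rw [hget k]; rfl
  rw [this]

-- a whole scan: A's dict equals B's, the invariant is preserved, and
-- "changed stayed false" means the scan did nothing at all
lemma pvSweep_spec (keys0 : List Int) (hnd0 : keys0.Nodup) :
    ∀ (cs : List Int) (d : PvDictT) (idx : PvIdxT) (ch : Bool), pvInv keys0 d idx →
      (cs.foldl (pvScanA keys0) d = (cs.foldl pvScanB (d, idx, ch)).1)
      ∧ pvInv keys0 (cs.foldl pvScanB (d, idx, ch)).1 (cs.foldl pvScanB (d, idx, ch)).2.1
      ∧ ((cs.foldl pvScanB (d, idx, ch)).2.2 = false → cs.foldl pvScanB (d, idx, ch) = (d, idx, ch)) := by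
  intro cs
  induction cs with
  | nil => intro d idx ch hinv; exact ⟨rfl, hinv, fun _ => rfl⟩
  | cons c cs ih =>
    intro d idx ch hinv
    rw [List.foldl_cons, List.foldl_cons]
    by_cases hc : (d.getD c []).length = 1
    · have hBsc : pvScanB (d, idx, ch) c
          = ((idx.getD ((d.getD c []).headD "") PySem.Dict.empty).keys).foldl
              (pvStepB c ((d.getD c []).headD "")) (d, idx, ch) := by
        show (if (d.getD c []).length = 1 then
            ((idx.getD ((d.getD c []).headD "") PySem.Dict.empty).keys).foldl
              (pvStepB c ((d.getD c []).headD "")) (d, idx, ch)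
          else (d, idx, ch)) = _
        rw [if_pos hc]
      have hAsc : pvScanA keys0 d c
          = keys0.foldl (pvStepA c ((d.getD c []).headD "")) d := by
        simp only [pvScanA]; rw [if_pos hc]
      set v := (d.getD c []).headD "" with hv
      obtain ⟨hkeys, hndI, hiff⟩ := hinv
      have hmemks : ∀ k ∈ (idx.getD v PySem.Dict.empty).keys, k ∈ keys0 ∧ v ∈ d.getD k [] := by
        intro k hk
        exact (hiff v k).mp ((PySem.Dict.contains_iff_mem_keys _ k).mpr hk)
      have hact := pvActB_spec keys0 c v ((idx.getD v PySem.Dict.empty).keys) d idx ch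
        (hndI v) hmemks ⟨hkeys, hndI, hiff⟩
      have hacteq := pvAct_eq keys0 hnd0 c v d idx ch ⟨hkeys, hndI, hiff⟩
      set r := ((idx.getD v PySem.Dict.empty).keys).foldl (pvStepB c v) (d, idx, ch) with hr
      have hrtriple : (r.1, r.2.1, r.2.2) = r := by simp
      have ihr := ih r.1 r.2.1 r.2.2 hact.1
      rw [hrtriple] at ihr
      obtain ⟨ih1, ih2, ih3⟩ := ihr
      refine ⟨?_, ?_, ?_⟩
      · rw [hAsc, hBsc, hacteq]; exact ih1
      · rw [hBsc]; exact ih2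
      · rw [hBsc]
        intro hfalse
        have hrr := ih3 hfalse
        have hrch : r.2.2 = false := by rw [hrr] at hfalse; exact hfalse
        have hany : (ch || ((idx.getD v PySem.Dict.empty).keys).any (fun k => k != c)) = false := by
          rw [← hact.2]; exact hrch
        have hall : ∀ k ∈ (idx.getD v PySem.Dict.empty).keys, k = c := by
          intro k hk
          have h2 := (Bool.or_eq_false_iff.mp hany).2
          rw [List.any_eq_false] at h2
          have h3 := h2 k hk
          simpa using h3
        have hid : r = (d, idx, ch) := by
          rw [hr]; exact pvActB_id c v _ _ hall
        rw [hrr]; exact hid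
      -- end singleton case
    · have hBsc : pvScanB (d, idx, ch) c = (d, idx, ch) := by
        simp only [pvScanB]
        rw [if_neg ?_]
        exact hc
      have hAsc : pvScanA keys0 d c = d := by
        simp only [pvScanA]; rw [if_neg hc]
      rw [hBsc, hAsc]
      exact ih d idx ch hinv

-- the 16-round loops: B's early exit cannot change the outcome
lemma pvLoop_spec (keys0 : List Int) (hnd0 : keys0.Nodup) :
    ∀ (n : Nat) (d : PvDictT) (idx : PvIdxT), pvInv keys0 d idx →
      pvLoopB keys0 n d idx = (pvSweepA keys0)^[n] d := by
  intro n
  induction n with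
  | zero => intro d idx _; simp [pvLoopB]
  | succ n ih =>
    intro d idx hinv
    obtain ⟨heq, hinv', hstop⟩ := pvSweep_spec keys0 hnd0 keys0 d idx false hinv
    have hsweep : pvSweepA keys0 d = (pvSweepB keys0 (d, idx, false)).1 := heq
    by_cases hch : (pvSweepB keys0 (d, idx, false)).2.2 = true
    · rw [pvLoopB, if_pos hch,
        ih _ _ (by exact hinv'), Function.iterate_succ_apply, hsweep]
    · have hch' : (pvSweepB keys0 (d, idx, false)).2.2 = false := by
        cases h : (pvSweepB keys0 (d, idx, false)).2.2
        · rfl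
        · exact absurd h hch
      have hfix : pvSweepB keys0 (d, idx, false) = (d, idx, false) := hstop hch'
      have hfixd : pvSweepA keys0 d = d := by rw [hsweep, hfix]
      rw [pvLoopB, if_neg hch, hfix, Function.iterate_fixed hfixd]

lemma pvRange_foldl_iterate (g : PvDictT → PvDictT) :
    ∀ (n : Nat) (d : PvDictT), (List.range n).foldl (fun d _ => g d) d = g^[n] d := by
  intro n
  induction n with
  | zero => intro d; simp
  | succ n ih =>
    intro d
    rw [List.range_succ, List.foldl_append, ih, List.foldl_cons, List.foldl_nil,
      Function.iterate_succ_apply']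

-- the initial index is correct
lemma pvBuildInner_contains (code : Int) :
    ∀ (vals : List String) (idx : PvIdxT) (w : String) (k : Int),
      (((vals.foldl (pvIdxAdd code) idx).getD w PySem.Dict.empty).contains k = true)
        ↔ ((w ∈ vals ∧ k = code) ∨ ((idx.getD w PySem.Dict.empty).contains k = true)) := by
  intro vals
  induction vals with
  | nil => intro idx w k; simp
  | cons v0 vs ih =>
    intro idx w k
    rw [List.foldl_cons, ih]
    have hstep : (pvIdxAdd code idx v0).getD w PySem.Dict.empty
        = if w = v0 then (idx.getD v0 PySem.Dict.empty).insert code true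
          else idx.getD w PySem.Dict.empty := by
      simp only [pvIdxAdd]; rw [PySem.Dict.getD_insert]
    rw [hstep]
    by_cases hw : w = v0
    · rw [if_pos hw, PySem.Dict.contains_insert]
      simp only [List.mem_cons, Bool.or_eq_true, beq_iff_eq, hw, true_or, true_and]
      tauto
    · rw [if_neg hw]
      simp only [List.mem_cons, hw, false_or]

lemma pvBuildInner_nodup (code : Int) :
    ∀ (vals : List String) (idx : PvIdxT),
      (∀ w, (idx.getD w PySem.Dict.empty).keys.Nodup) →
      ∀ w, ((vals.foldl (pvIdxAdd code) idx).getD w PySem.Dict.empty).keys.Nodup := by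
  intro vals
  induction vals with
  | nil => intro idx h w; exact h w
  | cons v0 vs ih =>
    intro idx h w
    rw [List.foldl_cons]
    refine ih _ ?_ w
    intro u
    simp only [pvIdxAdd]
    rw [PySem.Dict.getD_insert]
    split_ifs with hu
    · exact PySem.Dict.nodup_keys_insert _ _ _ (h v0)
    · exact h u

lemma pvBuild_contains :
    ∀ (ps : List (Int × List String)) (idx : PvIdxT) (w : String) (k : Int),
      (((ps.foldl (fun idx p => p.2.foldl (pvIdxAdd p.1) idx) idx).getD w PySem.Dict.empty).contains k = true)
        ↔ ((∃ vs, (k, vs) ∈ ps ∧ w ∈ vs) ∨ ((idx.getD w PySem.Dict.empty).contains k = true)) := by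
  intro ps
  induction ps with
  | nil => intro idx w k; simp
  | cons p ps ih =>
    intro idx w k
    rw [List.foldl_cons, ih, pvBuildInner_contains]
    constructor
    · rintro (⟨vs, hvs, hw⟩ | (⟨hw, hk⟩ | h))
      · exact Or.inl ⟨vs, List.mem_cons_of_mem _ hvs, hw⟩
      · refine Or.inl ⟨p.2, ?_, hw⟩
        rw [hk, Prod.mk.eta]
        exact List.mem_cons_self
      · exact Or.inr h
    · rintro (⟨vs, hvs, hw⟩ | h)
      · rcases List.mem_cons.mp hvs with heq | hmem
        · refine Or.inr (Or.inl ⟨?_, ?_⟩)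
          · show w ∈ p.2
            rw [← heq]
            exact hw
          · show k = p.1
            rw [← heq]
        · exact Or.inl ⟨vs, hmem, hw⟩
      · exact Or.inr (Or.inr h)

lemma pvBuild_nodup :
    ∀ (ps : List (Int × List String)) (idx : PvIdxT),
      (∀ w, (idx.getD w PySem.Dict.empty).keys.Nodup) →
      ∀ w, ((ps.foldl (fun idx p => p.2.foldl (pvIdxAdd p.1) idx) idx).getD w PySem.Dict.empty).keys.Nodup := by
  intro ps
  induction ps with
  | nil => intro idx h w; exact h w
  | cons p ps ih =>
    intro idx h w
    rw [List.foldl_cons]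
    exact ih _ (pvBuildInner_nodup p.1 p.2 idx h) w

lemma pvInv_init (opcodes : List (Int × List String)) :
    pvInv (PySem.Dict.ofList opcodes).keys (PySem.Dict.ofList opcodes)
      (pvBuildIdxB (PySem.Dict.ofList opcodes).items) := by
  have hnd := PySem.Dict.nodup_keys_ofList (ps := opcodes)
  refine ⟨rfl, ?_, ?_⟩
  · intro w
    refine pvBuild_nodup _ _ ?_ w
    intro u
    rw [PySem.Dict.getD_empty]
    simp [PySem.Dict.keys, PySem.Dict.empty]
  · intro w k
    unfold pvBuildIdxB
    rw [pvBuild_contains]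
    have hbase : ((PySem.Dict.empty : PvIdxT).getD w PySem.Dict.empty).contains k = false := by
      simp [PySem.Dict.getD_empty, PySem.Dict.contains_empty]
    rw [hbase]
    simp only [Bool.false_eq_true, or_false]
    constructor
    · rintro ⟨vs, hmem, hw⟩
      refine ⟨PySem.Dict.mem_keys_of_mem_items _ hmem, ?_⟩
      rw [PySem.Dict.getD_of_mem_items _ hmem hnd]
      exact hw
    · rintro ⟨hk, hw⟩
      have hcont : (PySem.Dict.ofList opcodes).contains k = true :=
        (PySem.Dict.contains_iff_mem_keys _ k).mpr hk
      have hsome : ∃ l, (PySem.Dict.ofList opcodes).get? k = some l := by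
        rcases h : (PySem.Dict.ofList opcodes).get? k with _ | l
        · rw [PySem.Dict.get?_eq_none_iff_not_mem_keys] at h
          exact absurd hk h
        · exact ⟨l, rfl⟩
      obtain ⟨l, hl⟩ := hsome
      refine ⟨l, PySem.Dict.mem_items_of_get?_eq_some _ hl, ?_⟩
      rw [show (PySem.Dict.ofList opcodes).getD k [] = l from by
        rw [PySem.Dict.getD_eq_get?_getD, hl]; rfl] at hw
      exact hw

-- ===== VERDICT (by name: the statement is the Claim_ definition above) =====
theorem process_opcodes_spec : Claim_equal_process_opcodes := by
  intro opcodes _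
  unfold Spec_process_opcodes process_opcodes process_opcodes_alt
  rw [pvRange_foldl_iterate (g := pvSweepA (PySem.Dict.ofList opcodes).keys) 16 (PySem.Dict.ofList opcodes),
    pvLoop_spec (PySem.Dict.ofList opcodes).keys (PySem.Dict.nodup_keys_ofList opcodes) 16
      (PySem.Dict.ofList opcodes) _ (pvInv_init opcodes)]
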